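-- pv_equiv track=rewrite | github.com/Timur-Cheryapov/youtube-search | crawler/supabase_client.py | _extract_thumbnail_url
-- ===== SOURCE A (Python) =====
-- from typing import Dict, List, Optional
--
-- def _extract_thumbnail_url(thumbnails: List) -> Optional[str]:
--     """Extract the best thumbnail URL from thumbnails list"""
--     if not thumbnails:
--         return None
--
--     # Prefer hqdefault.webp, then hqdefault.jpg, then any thumbnail
--     for thumbnail in thumbnails:
--         if isinstance(thumbnail, dict) and 'url' in thumbnail:
--             url = thumbnail['url']
--             if 'hqdefault.webp' in url:
--                 return url
--
--     for thumbnail in thumbnails: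
--         if isinstance(thumbnail, dict) and 'url' in thumbnail:
--             url = thumbnail['url']
--             if 'hqdefault' in url:
--                 return url
--
--     # Fallback to first available thumbnail
--     if thumbnails and isinstance(thumbnails[0], dict) and 'url' in thumbnails[0]:
--         return thumbnails[0]['url']
--
--     return None
-- ===== SOURCE B (Python) =====
-- from typing import Dict, List, Optional
--
-- def _extract_thumbnail_url(thumbnails: List) -> Optional[str]:
--     """Extract the best thumbnail URL in a single pass over the list."""
--     if not thumbnails:
--         return None
--
--     first = thumbnails[0]
--     first_zero = first['url'] if isinstance(first, dict) and 'url' in first else None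
--
--     first_webp = None
--     first_hq = None
--     for t in thumbnails:
--         if isinstance(t, dict) and 'url' in t:
--             u = t['url']
--             if first_webp is None and 'hqdefault.webp' in u:
--                 first_webp = u
--             if first_hq is None and 'hqdefault' in u:
--                 first_hq = u
--
--     if first_webp is not None:
--         return first_webp
--     if first_hq is not None:
--         return first_hq
--     return first_zero
-- ===== Notes on version B (the rewrite author's own statement) =====
-- stated objective: alternative
-- what changed: Replaces A's two sequential find-first scans plus a separate index-0 fallback with a single fold over the list that maintains two 'first match' optionals (webp and hq), combined with the head's url after the pass.
import Mathlib
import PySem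

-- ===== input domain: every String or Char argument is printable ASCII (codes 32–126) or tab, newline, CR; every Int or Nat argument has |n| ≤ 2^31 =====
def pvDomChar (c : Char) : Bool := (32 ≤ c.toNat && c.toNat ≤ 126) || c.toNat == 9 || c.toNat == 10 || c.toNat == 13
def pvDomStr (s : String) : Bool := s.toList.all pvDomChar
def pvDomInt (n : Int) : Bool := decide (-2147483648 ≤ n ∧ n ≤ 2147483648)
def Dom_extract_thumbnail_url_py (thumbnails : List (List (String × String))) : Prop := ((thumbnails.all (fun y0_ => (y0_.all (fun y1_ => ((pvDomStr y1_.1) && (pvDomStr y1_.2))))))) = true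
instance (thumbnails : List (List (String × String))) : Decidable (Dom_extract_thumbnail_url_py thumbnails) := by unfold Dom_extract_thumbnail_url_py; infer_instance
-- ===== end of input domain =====

-- B replaces A's two sequential find-first scans plus an index-0 fallback with one fold
-- maintaining two 'first match' optionals; same return value on every input.

-- ===== PORT A =====
-- one for-loop of A: scan for the first dict whose 'url' value contains `sub`
def pvScanA (sub : String) : List (List (String × String)) → Option String
  | [] => none
  | t :: rest =>
    match (PySem.Dict.mk t).get? "url" with
    | some url => if PySem.Str.isIn sub url then some url else pvScanA sub rest
    | none => pvScanA sub rest

def extract_thumbnail_url_py (thumbnails : List (List (String × String))) : Option String :=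
  if thumbnails = [] then none
  else
    match pvScanA "hqdefault.webp" thumbnails with
    | some url => some url
    | none =>
      match pvScanA "hqdefault" thumbnails with
      | some url => some url
      | none =>
        match thumbnails with
        | [] => none
        | t0 :: _ => (PySem.Dict.mk t0).get? "url"

-- ===== PORT B =====
-- B's loop body: record u as the first match for `sub` if none is recorded yet
def pvUpd (sub : String) (u : String) : Option String → Option String
  | none => if PySem.Str.isIn sub u then some u else none
  | some x => some x

def pvStep (st : Option String × Option String) (t : List (String × String)) :
    Option String × Option String :=
  match (PySem.Dict.mk t).get? "url" with
  | some u => (pvUpd "hqdefault.webp" u st.1, pvUpd "hqdefault" u st.2)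
  | none => st

def extract_thumbnail_url_py_alt (thumbnails : List (List (String × String))) : Option String :=
  match thumbnails with
  | [] => none
  | t0 :: _ =>
    let firstZero := (PySem.Dict.mk t0).get? "url"
    let st := thumbnails.foldl pvStep (none, none)
    match st.1 with
    | some u => some u
    | none =>
      match st.2 with
      | some u => some u
      | none => firstZero

-- ===== PRECONDITION & SPEC =====
def Spec_extract_thumbnail_url_py (thumbnails : List (List (String × String))) (out : Option String) : Prop := out = extract_thumbnail_url_py_alt thumbnails
instance (thumbnails : List (List (String × String))) (out : Option String) : Decidable (Spec_extract_thumbnail_url_py thumbnails out) := by unfold Spec_extract_thumbnail_url_py; infer_instance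

-- ===== CLAIM (what is proved, stated in full; the proofs are below) =====
def Claim_equal_extract_thumbnail_url_py : Prop := ∀ (thumbnails : List (List (String × String))), Dom_extract_thumbnail_url_py thumbnails → Spec_extract_thumbnail_url_py thumbnails (extract_thumbnail_url_py thumbnails)

-- ===== LEMMAS AND PROOFS =====

-- B's fold computes, in each component, the value A's corresponding scan finds
-- (unless the accumulator was already set, in which case it is kept).
theorem pvFold_eq (l : List (List (String × String))) (a b : Option String) :
    l.foldl pvStep (a, b) =
      ((match a with | some x => some x | none => pvScanA "hqdefault.webp" l),
       (match b with | some x => some x | none => pvScanA "hqdefault" l)) := by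
  induction l generalizing a b with
  | nil => cases a <;> cases b <;> simp [pvScanA]
  | cons t rest ih =>
    simp only [List.foldl_cons, pvStep, pvScanA]
    cases h : (PySem.Dict.mk t).get? "url" with
    | none => rw [ih]
    | some u =>
      simp only [pvUpd]
      rw [ih]
      cases a <;> cases b <;> simp only [] <;> split_ifs <;> simp

-- ===== VERDICT (by name: the statement is the Claim_ definition above) =====
theorem extract_thumbnail_url_py_spec : Claim_equal_extract_thumbnail_url_py := by
  intro thumbnails _
  unfold Spec_extract_thumbnail_url_py extract_thumbnail_url_py extract_thumbnail_url_py_alt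
  cases thumbnails with
  | nil => simp
  | cons t0 rest =>
    simp only [if_neg (List.cons_ne_nil t0 rest)]
    rw [pvFold_eq]
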